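-- pv_equiv track=rewrite | github.com/pkitslaar/AdventOfCode | 2024/day 19/day_19.py | parse
-- ===== SOURCE A (Python) =====
-- def parse(data):
--     towels = []
--     designs = []
--     for line in data.strip().splitlines():
--         if not line.strip():
--             continue
--         if not towels:
--             towels = [t.strip() for t in line.split(',')]
--         else:
--             designs.append(line.strip())
--     return towels, designs
-- ===== SOURCE B (Python) =====
-- def parse(data):
--     return _go(data.strip().splitlines())
--
-- def _go(lines):
--     # recurse past blank lines until the header line, whose comma tokens are the towels;
--     # everything after the header yields the designs
--     if not lines:
--         return [], []
--     head, rest = lines[0], lines[1:]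
--     if not head.strip():
--         return _go(rest)
--     return [t.strip() for t in head.split(',')], _designs(rest)
--
-- def _designs(lines):
--     # structural recursion: cons each stripped non-blank line onto the designs of the tail
--     if not lines:
--         return []
--     head, rest = lines[0], lines[1:]
--     tail = _designs(rest)
--     return tail if not head.strip() else [head.strip()] + tail
-- ===== Notes on version B (the rewrite author's own statement) =====
-- stated objective: alternative
-- what changed: Replaces A's stateful single-pass loop (with its towels-empty one-shot flag and list appends) by structural recursion on the line list: one recursive function skips blanks until the header line and a second recursion builds the designs by consing onto the recursive tail result.
import Mathlib
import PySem

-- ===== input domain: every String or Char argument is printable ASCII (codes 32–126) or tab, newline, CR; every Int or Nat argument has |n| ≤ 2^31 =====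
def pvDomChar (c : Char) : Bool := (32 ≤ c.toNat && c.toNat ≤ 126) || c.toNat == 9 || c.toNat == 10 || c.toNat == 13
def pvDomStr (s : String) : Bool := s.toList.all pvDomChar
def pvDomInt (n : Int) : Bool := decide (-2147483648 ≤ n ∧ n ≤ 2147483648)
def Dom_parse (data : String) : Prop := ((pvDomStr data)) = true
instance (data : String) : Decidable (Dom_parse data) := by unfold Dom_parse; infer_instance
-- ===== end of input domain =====

-- B replaces A's stateful one-shot-flag loop by structural recursion on the line list
-- (skip blanks to the header, then cons designs onto the recursive tail); objective: alternative.

-- ===== PORT A =====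
-- [t.strip() for t in line.split(',')]
def pvTokens (line : String) : List String :=
  (PySem.Chars.splitOn line.toList [',']).map (fun t => String.ofList (PySem.Chars.strip t))

-- loop body of A: state = (towels, designs)
def pvStepA (st : List String × List String) (line : String) : List String × List String :=
  if PySem.Str.strip line = "" then st
  else if st.1 = [] then (pvTokens line, st.2)
  else (st.1, st.2 ++ [PySem.Str.strip line])

def parse (data : String) : List String × List String :=
  (PySem.Str.splitlines (PySem.Str.strip data)).foldl pvStepA ([], [])

-- ===== PORT B =====
-- B's helper _designs: cons each stripped non-blank line onto the designs of the tail
def pvDesigns : List String → List String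
  | [] => []
  | l :: rest =>
      let tail := pvDesigns rest
      if PySem.Str.strip l = "" then tail else PySem.Str.strip l :: tail

-- B's helper _go: recurse past blank lines until the header line
def pvGo : List String → List String × List String
  | [] => ([], [])
  | l :: rest =>
      if PySem.Str.strip l = "" then pvGo rest
      else (pvTokens l, pvDesigns rest)

def parse_alt (data : String) : List String × List String :=
  pvGo (PySem.Str.splitlines (PySem.Str.strip data))

-- ===== PRECONDITION & SPEC =====
def Spec_parse (data : String) (out : List String × List String) : Prop := out = parse_alt data
instance (data : String) (out : List String × List String) : Decidable (Spec_parse data out) := by unfold Spec_parse; infer_instance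

-- ===== CLAIM (what is proved, stated in full; the proofs are below) =====
def Claim_equal_parse : Prop := ∀ (data : String), Dom_parse data → Spec_parse data (parse data)

-- ===== LEMMAS AND PROOFS =====

lemma splitOn_go_ne_nil (sep : List Char) :
    ∀ (fuel : Nat) (l cur : List Char) (acc : List (List Char)),
      PySem.Chars.splitOn.go sep fuel l cur acc ≠ [] := by
  intro fuel
  induction fuel with
  | zero =>
      intro l cur acc
      simp [PySem.Chars.splitOn.go]
  | succ n ih =>
      intro l cur acc
      cases l with
      | nil => simp [PySem.Chars.splitOn.go]
      | cons c rest =>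
          simp only [PySem.Chars.splitOn.go]
          split
          · exact ih _ _ _
          · exact ih _ _ _

lemma pvTokens_ne_nil (line : String) : pvTokens line ≠ [] := by
  unfold pvTokens PySem.Chars.splitOn
  intro h
  exact splitOn_go_ne_nil _ _ _ _ _ (by simpa using h)

-- once towels ≠ [], A's loop appends exactly what B's pvDesigns recursion conses
lemma foldl_stepA_phase2 (L : List String) :
    ∀ (t d : List String), t ≠ [] →
      L.foldl pvStepA (t, d) = (t, d ++ pvDesigns L) := by
  induction L with
  | nil => intro t d _; simp [pvDesigns]
  | cons l L ih =>
      intro t d ht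
      by_cases hl : PySem.Str.strip l = ""
      · simp [pvStepA, pvDesigns, hl, ih _ _ ht]
      · simp [pvStepA, pvDesigns, hl, ht, ih _ _ ht]

lemma foldl_stepA_eq (L : List String) :
    L.foldl pvStepA ([], []) = pvGo L := by
  induction L with
  | nil => simp [pvGo]
  | cons l L ih =>
      by_cases hl : PySem.Str.strip l = ""
      · simpa [pvStepA, pvGo, hl] using ih
      · simp [pvStepA, pvGo, hl, foldl_stepA_phase2 L _ _ (pvTokens_ne_nil l)]

-- ===== VERDICT (by name: the statement is the Claim_ definition above) =====
theorem parse_spec : Claim_equal_parse := by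
  intro data _
  unfold Spec_parse parse parse_alt
  exact foldl_stepA_eq _
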